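-- pv_equiv track=rewrite | github.com/anshposwal29/Everdash | moodtriggers/MT-dashboard-main/backend/mtrevamp_H.py | _select_single_ema
-- ===== SOURCE A (Python) =====
-- from typing import Optional, Dict, List, Tuple
-- from typing import Optional, List, Tuple, Dict
--
-- def _select_single_ema(inner_jsons: List[str]) -> Optional[str]:
--     """
--     Return exactly one EMA file path from inner_jsons, preferring user_survey_responses.json.#AL: I changed the order, if both are present ema_response needs to be preferred
--     """
--     usr = None
--     ema = None
--     for p in inner_jsons:
--         lp = p.lower()
--         if lp.endswith("ema_responses.json"):
--             usr = p
--             break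
--         if lp.endswith("user_survey_responses.json"):
--             ema = p
--     return usr or ema
-- ===== SOURCE B (Python) =====
-- def _select_single_ema(inner_jsons):
--     # First pass: first path ending with 'ema_responses.json' wins outright.
--     for p in inner_jsons:
--         if p.lower().endswith("ema_responses.json"):
--             return p
--     # Otherwise: last path ending with 'user_survey_responses.json', via a
--     # back-to-front scan returning its first match.
--     for p in reversed(inner_jsons):
--         if p.lower().endswith("user_survey_responses.json"):
--             return p
--     return None
-- ===== Notes on version B (the rewrite author's own statement) =====
-- stated objective: simpler
-- what changed: A's single stateful loop with two accumulators, break and 'usr or ema' is split into two independent early-return scans: a forward scan for the first ema match, then a reverse scan for the last user_survey match.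
import Mathlib
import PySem

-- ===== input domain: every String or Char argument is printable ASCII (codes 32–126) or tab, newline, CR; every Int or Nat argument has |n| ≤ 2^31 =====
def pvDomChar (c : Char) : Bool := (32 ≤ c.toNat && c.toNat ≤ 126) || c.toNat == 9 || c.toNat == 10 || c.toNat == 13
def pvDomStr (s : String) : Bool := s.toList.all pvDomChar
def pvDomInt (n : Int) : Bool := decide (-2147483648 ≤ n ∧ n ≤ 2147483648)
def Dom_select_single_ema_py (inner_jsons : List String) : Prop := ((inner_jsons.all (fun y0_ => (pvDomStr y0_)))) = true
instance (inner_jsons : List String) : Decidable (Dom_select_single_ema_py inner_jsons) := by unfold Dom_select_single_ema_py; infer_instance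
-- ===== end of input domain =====

-- B replaces A's single stateful loop (two accumulators, break, 'usr or ema') by two
-- independent early-return scans: forward for the first ema match, reverse for the last
-- user_survey match; objective: simpler.

-- ===== PORT A =====
-- Python 'usr or ema' on Optional[str]: a non-None empty string is falsy
def pyOrStr (a b : Option String) : Option String :=
  match a with
  | some s => if PySem.Str.len s = 0 then b else some s
  | none => b

-- the for-loop: state = ema accumulator; 'break' returns 'usr or ema' immediately
def selLoopA : List String → Option String → Option String
  | [], ema => pyOrStr none ema
  | p :: rest, ema =>
    let lp := PySem.Str.lower p
    if PySem.Str.endswith lp "ema_responses.json" then pyOrStr (some p) ema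
    else if PySem.Str.endswith lp "user_survey_responses.json" then selLoopA rest (some p)
    else selLoopA rest ema

def select_single_ema_py (inner_jsons : List String) : Option String :=
  selLoopA inner_jsons none

-- ===== PORT B =====
-- first pass: first path ending with 'ema_responses.json'
def bFirstEma : List String → Option String
  | [] => none
  | p :: rest =>
    if PySem.Str.endswith (PySem.Str.lower p) "ema_responses.json" then some p
    else bFirstEma rest

-- second pass, over the reversed list: first path ending with 'user_survey_responses.json'
def bRevUsr : List String → Option String
  | [] => none
  | p :: rest =>
    if PySem.Str.endswith (PySem.Str.lower p) "user_survey_responses.json" then some p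
    else bRevUsr rest

def select_single_ema_py_alt (inner_jsons : List String) : Option String :=
  match bFirstEma inner_jsons with
  | some p => some p
  | none => bRevUsr inner_jsons.reverse

-- ===== PRECONDITION & SPEC =====
def Spec_select_single_ema_py (inner_jsons : List String) (out : Option String) : Prop := out = select_single_ema_py_alt inner_jsons
instance (inner_jsons : List String) (out : Option String) : Decidable (Spec_select_single_ema_py inner_jsons out) := by unfold Spec_select_single_ema_py; infer_instance

-- ===== CLAIM (what is proved, stated in full; the proofs are below) =====
def Claim_equal_select_single_ema_py : Prop := ∀ (inner_jsons : List String), Dom_select_single_ema_py inner_jsons → Spec_select_single_ema_py inner_jsons (select_single_ema_py inner_jsons)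

-- ===== LEMMAS AND PROOFS =====

-- ===== VERDICT (by name: the statement is the Claim_ definition above) =====
-- a string ending (after lowering) in a nonempty suffix is nonempty, so Python's 'or' keeps it
theorem endswith_ema_nonempty (p : String)
    (h : PySem.Str.endswith (PySem.Str.lower p) "ema_responses.json" = true) :
    PySem.Str.len p ≠ 0 := by
  simp [PySem.Str.endswith_eq, PySem.Str.len_eq, PySem.Chars.endswith_iff,
    PySem.Str.toList_lower] at h ⊢
  rcases h with ⟨t, ht⟩
  intro hnil
  simp [PySem.Chars.lower, hnil] at ht

theorem bRevUsr_append (l m : List String) :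
    bRevUsr (l ++ m) = (bRevUsr l).or (bRevUsr m) := by
  induction l with
  | nil => simp [bRevUsr]
  | cons p rest ih =>
    simp only [List.cons_append, bRevUsr, ih]
    split_ifs <;> simp

theorem selLoopA_eq (xs : List String) (acc : Option String) :
    selLoopA xs acc =
      match bFirstEma xs with
      | some p => some p
      | none => (bRevUsr xs.reverse).or acc := by
  induction xs generalizing acc with
  | nil => simp [selLoopA, bFirstEma, bRevUsr, pyOrStr]
  | cons p rest ih =>
    simp only [selLoopA, bFirstEma, List.reverse_cons, bRevUsr_append]
    by_cases hema : PySem.Str.endswith (PySem.Str.lower p) "ema_responses.json" = true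
    · simp only [hema, if_true, pyOrStr, if_neg (endswith_ema_nonempty p hema)]
    · by_cases husr : PySem.Str.endswith (PySem.Str.lower p) "user_survey_responses.json" = true
      · simp only [hema, husr, if_true, Bool.false_eq_true, if_false, ih, bRevUsr]
        cases bFirstEma rest <;> simp
      · simp only [hema, husr, Bool.false_eq_true, if_false, ih, bRevUsr]
        cases bFirstEma rest <;> simp

theorem select_single_ema_py_spec : Claim_equal_select_single_ema_py := by
  intro xs _
  unfold Spec_select_single_ema_py select_single_ema_py select_single_ema_py_alt
  rw [selLoopA_eq]
  cases bFirstEma xs <;> simp
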